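-- pv_equiv track=rewrite | github.com/bbamsch/cmpe257 | project/midi/splits/brahms-hungarian/AudioProcessing-3Layer.py | generate_sequences
-- ===== SOURCE A (Python) =====
-- def generate_sequences(notes_by_file, note_to_int, sequence_length = 100):
--     x = []
--     y = []
--
--     for notes in notes_by_file.values():
--         for i in range(0, len(notes) - sequence_length, 1):
--             input_sequence = notes[i:i + sequence_length]
--             output_sequence = notes[i + sequence_length]
--
--             x.append([note_to_int[c] for c in input_sequence])
--             y.append(note_to_int[output_sequence])
--
--     return x, y
-- ===== SOURCE B (Python) =====
-- def generate_sequences(notes_by_file, note_to_int, sequence_length = 100):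
--     x = []
--     y = []
--
--     for notes in notes_by_file.values():
--         if len(notes) <= sequence_length:
--             continue
--         window = []
--         for c in notes:
--             v = note_to_int[c]
--             if len(window) == sequence_length:
--                 x.append(window.copy())
--                 y.append(v)
--             window.append(v)
--             if len(window) > sequence_length:
--                 window.pop(0)
--
--     return x, y
-- ===== Notes on version B (the rewrite author's own statement) =====
-- stated objective: alternative
-- what changed: B replaces A's index-range loop that re-slices and re-maps each window through the dict with a single streaming pass per file that maintains a sliding window of already-mapped integers, emitting a window copy and the next value as each note arrives.
import Mathlib
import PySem

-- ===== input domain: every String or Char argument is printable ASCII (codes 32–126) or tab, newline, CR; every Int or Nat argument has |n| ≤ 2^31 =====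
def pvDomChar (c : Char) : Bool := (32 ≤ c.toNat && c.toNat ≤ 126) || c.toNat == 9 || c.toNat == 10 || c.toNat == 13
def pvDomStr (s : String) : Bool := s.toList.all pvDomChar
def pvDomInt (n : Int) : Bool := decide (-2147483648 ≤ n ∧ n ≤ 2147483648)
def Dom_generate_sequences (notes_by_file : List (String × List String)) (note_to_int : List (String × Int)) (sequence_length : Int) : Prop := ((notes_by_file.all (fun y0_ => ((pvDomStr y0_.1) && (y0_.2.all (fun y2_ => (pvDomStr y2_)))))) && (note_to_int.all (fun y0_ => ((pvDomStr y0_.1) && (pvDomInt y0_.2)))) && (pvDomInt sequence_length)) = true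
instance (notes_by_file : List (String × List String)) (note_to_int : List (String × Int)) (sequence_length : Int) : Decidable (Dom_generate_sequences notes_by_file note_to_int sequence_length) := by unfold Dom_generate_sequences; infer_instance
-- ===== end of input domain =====

-- B streams each file once, maintaining a sliding window of already-mapped integers, instead of
-- A's index-range loop that re-slices the note list and re-maps every window through the dict.

-- ===== PORT A =====
def generate_sequences (notes_by_file : List (String × List String)) (note_to_int : List (String × Int)) (sequence_length : Int) : List (List Int) × List Int :=
  let m := PySem.Dict.ofList note_to_int
  (PySem.Dict.ofList notes_by_file).values.foldl (init := (([] : List (List Int)), ([] : List Int))) (fun xy notes =>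
    (PySem.List.pyRange 0 ((notes.length : Int) - sequence_length) 1).foldl (init := xy) (fun xy i =>
      let input_sequence := PySem.List.slice notes (some i) (some (i + sequence_length))
      -- pyGetD is exact here: Pre_ (0 ≤ sequence_length) keeps i + sequence_length in range
      let output_sequence := PySem.List.pyGetD notes (i + sequence_length) ""
      (xy.1 ++ [input_sequence.map (fun c => m.getD c 0)], xy.2 ++ [m.getD output_sequence 0])))

-- ===== PORT B =====
-- the inner-loop body of Source B: emit when the window is full, append the new value, pop(0) on overflow
-- (pop(0) is `tail`, exact because the list was just appended to and is nonempty)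
def pvStep (sequence_length : Int) (s : List (List Int) × List Int × List Int) (v : Int) : List (List Int) × List Int × List Int :=
  let s := if (s.2.2.length : Int) = sequence_length then (s.1 ++ [s.2.2], s.2.1 ++ [v], s.2.2) else s
  let w := s.2.2 ++ [v]
  (s.1, s.2.1, if sequence_length < (w.length : Int) then w.tail else w)

def generate_sequences_alt (notes_by_file : List (String × List String)) (note_to_int : List (String × Int)) (sequence_length : Int) : List (List Int) × List Int :=
  let m := PySem.Dict.ofList note_to_int
  (PySem.Dict.ofList notes_by_file).values.foldl (init := (([] : List (List Int)), ([] : List Int))) (fun xy notes =>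
    if (notes.length : Int) ≤ sequence_length then xy
    else
      let s := notes.foldl (fun s c => pvStep sequence_length s (m.getD c 0)) (xy.1, xy.2, ([] : List Int))
      (s.1, s.2.1))

-- ===== PRECONDITION & SPEC =====
-- Pre_ excludes (a) negative sequence_length — outside the task's natural domain; A's values there
-- come from accidental negative-index/slice wraparound (and A raises IndexError on any empty file) —
-- and (b) inputs where the Python A raises KeyError: a file longer than sequence_length containing
-- a note missing from note_to_int.
def Pre_generate_sequences (notes_by_file : List (String × List String)) (note_to_int : List (String × Int)) (sequence_length : Int) : Prop :=
  0 ≤ sequence_length ∧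
  ∀ notes ∈ (PySem.Dict.ofList notes_by_file).values,
    sequence_length < (notes.length : Int) →
      ∀ c ∈ notes, ((PySem.Dict.ofList note_to_int).get? c).isSome
instance (notes_by_file : List (String × List String)) (note_to_int : List (String × Int)) (sequence_length : Int) : Decidable (Pre_generate_sequences notes_by_file note_to_int sequence_length) := by unfold Pre_generate_sequences; infer_instance
def pvWitness_generate_sequences : (List (String × List String)) × (List (String × Int)) × Int :=
  ([("f", ["a", "b", "c"])], [("a", 1), ("b", 2), ("c", 3)], 1)

def Spec_generate_sequences (notes_by_file : List (String × List String)) (note_to_int : List (String × Int)) (sequence_length : Int) (out : List (List Int) × List Int) : Prop := out = generate_sequences_alt notes_by_file note_to_int sequence_length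
instance (notes_by_file : List (String × List String)) (note_to_int : List (String × Int)) (sequence_length : Int) (out : List (List Int) × List Int) : Decidable (Spec_generate_sequences notes_by_file note_to_int sequence_length out) := by unfold Spec_generate_sequences; infer_instance

-- ===== CLAIM (what is proved, stated in full; the proofs are below) =====
def Claim_equal_generate_sequences : Prop := ∀ (notes_by_file : List (String × List String)) (note_to_int : List (String × Int)) (sequence_length : Int), Dom_generate_sequences notes_by_file note_to_int sequence_length → Pre_generate_sequences notes_by_file note_to_int sequence_length → Spec_generate_sequences notes_by_file note_to_int sequence_length (generate_sequences notes_by_file note_to_int sequence_length)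

-- ===== LEMMAS AND PROOFS =====

-- A's inner loop appends one x-entry and one y-entry per index: it is two maps over the range
theorem pv_foldl_pair_append {α : Type} (l : List α) (f : α → List Int) (g : α → Int)
    (x : List (List Int)) (y : List Int) :
    l.foldl (fun acc i => (acc.1 ++ [f i], acc.2 ++ [g i])) (x, y) = (x ++ l.map f, y ++ l.map g) := by
  induction l generalizing x y with
  | nil => simp
  | cons a t ih => simp [List.foldl_cons, ih, List.append_assoc]

-- invariant of B's streaming pass over the mapped list p: after the whole list,
-- x has gained every full window, y every element past the first n, and the window is p's last <= n elements
theorem pvStep_full (n : Nat) (x : List (List Int)) (y w : List Int) (v : Int) (hw : w.length = n) :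
    pvStep (n : Int) (x, y, w) v = (x ++ [w], y ++ [v], (w ++ [v]).tail) := by
  simp only [pvStep]
  rw [if_pos (by simp [hw])]
  rw [if_pos (by simp [hw])]

theorem pvStep_not_full (n : Nat) (x : List (List Int)) (y w : List Int) (v : Int) (hw : w.length < n) :
    pvStep (n : Int) (x, y, w) v = (x, y, w ++ [v]) := by
  simp only [pvStep]
  rw [if_neg (by simp; omega)]
  rw [if_neg (by simp; omega)]

theorem pv_stream_inv (n : Nat) (p : List Int) (x0 : List (List Int)) (y0 : List Int) :
    p.foldl (fun s v => pvStep (n : Int) s v) (x0, y0, ([] : List Int))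
      = (x0 ++ (List.range (p.length - n)).map (fun i => (p.drop i).take n),
         y0 ++ p.drop n,
         p.drop (p.length - n)) := by
  induction p using List.reverseRecOn with
  | nil => simp
  | append_singleton p v ih =>
    rw [List.foldl_append, ih, List.foldl_cons, List.foldl_nil]
    have hL : (p ++ [v]).length = p.length + 1 := by simp
    by_cases h : n ≤ p.length
    · have hwl : (p.drop (p.length - n)).length = n := by
        rw [List.length_drop]; omega
      rw [pvStep_full n _ _ _ v hwl]
      have hdrop : (p ++ [v]).drop ((p ++ [v]).length - n) = (p.drop (p.length - n) ++ [v]).tail := by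
        rcases Nat.eq_zero_or_pos n with hn0 | hn0
        · subst hn0
          simp [List.drop_of_length_le]
        · have hne : p.drop (p.length - n) ≠ [] := by
            intro hc; rw [← List.length_eq_zero_iff, hwl] at hc; omega
          rw [List.tail_append_of_ne_nil hne, hL]
          have h3 : p.length + 1 - n = (p.length - n) + 1 := by omega
          rw [h3, List.drop_append_of_le_length (by omega), List.drop_add_one_eq_tail_drop]
      have hrange : (List.range ((p ++ [v]).length - n)).map (fun i => ((p ++ [v]).drop i).take n)
          = (List.range (p.length - n)).map (fun i => (p.drop i).take n) ++ [p.drop (p.length - n)] := by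
        have hl : (p ++ [v]).length - n = (p.length - n) + 1 := by rw [hL]; omega
        rw [hl, List.range_succ, List.map_append, List.map_singleton]
        have hlast : ((p ++ [v]).drop (p.length - n)).take n = p.drop (p.length - n) := by
          rw [List.drop_append_of_le_length (by omega), List.take_left' hwl]
        rw [hlast]
        congr 1
        apply List.map_congr_left
        intro i hi
        rw [List.mem_range] at hi
        rw [List.drop_append_of_le_length (by omega), List.take_append_of_le_length (by rw [List.length_drop]; omega)]
      have hdropn : (p ++ [v]).drop n = p.drop n ++ [v] := by
        rw [List.drop_append_of_le_length h]
      rw [hrange, hdropn, hdrop, List.append_assoc, List.append_assoc]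
    · -- window not yet full: no emission, no pop
      have hlt : p.length < n := by omega
      have h2 : p.length - n = 0 := Nat.sub_eq_zero_of_le (by omega)
      have hwd : p.drop (p.length - n) = p := by rw [h2]; rfl
      rw [hwd, pvStep_not_full n _ _ _ v hlt]
      have h1 : p.length + 1 - n = 0 := by omega
      rw [hL, h1, h2]
      simp [List.drop_of_length_le (le_of_lt hlt), List.drop_of_length_le (show (p ++ [v]).length ≤ n by rw [hL]; omega)]

-- dropping the first n elements, written as the range-indexed map A produces
theorem pv_drop_eq_range_map (l : List Int) (n : Nat) (h : n ≤ l.length) :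
    (List.range (l.length - n)).map (fun i => l.getD (n + i) 0) = l.drop n := by
  apply List.ext_getElem
  · simp
  · intro i h1 h2
    have hi : n + i < l.length := by simp at h1; omega
    simp [hi]

theorem generate_sequences_spec : Claim_equal_generate_sequences := by
  intro notes_by_file note_to_int sequence_length _hdom hpre
  obtain ⟨hnn, _hkeys⟩ := hpre
  unfold Spec_generate_sequences generate_sequences generate_sequences_alt
  apply PySem.List.foldl_congr_mem
  intro acc notes _hmem
  set m := PySem.Dict.ofList note_to_int with hm
  obtain ⟨n, hn⟩ := Int.eq_ofNat_of_zero_le hnn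
  subst hn
  by_cases hle : (notes.length : Int) ≤ (n : Int)
  · rw [if_pos hle, PySem.List.pyRange_one_eq_nil (by omega), List.foldl_nil]
  · rw [if_neg hle]
    have hlen : n < notes.length := by exact_mod_cast lt_of_not_ge fun h => hle (by exact_mod_cast h)
    -- B side: fold over notes with mapping = fold of pvStep over the mapped list
    have hB : notes.foldl (fun s c => pvStep (n : Int) s (m.getD c 0)) (acc.1, acc.2, ([] : List Int))
        = (notes.map (fun c => m.getD c 0)).foldl (fun s v => pvStep (n : Int) s v) (acc.1, acc.2, ([] : List Int)) := by
      rw [List.foldl_map]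
    rw [hB, pv_stream_inv]
    have hKi : (notes.length : Int) - (n : Int) = ((notes.length - n : Nat) : Int) := by
      push_cast [Nat.cast_sub hlen.le]; ring
    rw [hKi, PySem.List.pyRange_zero_natCast, List.foldl_map]
    refine Eq.trans (pv_foldl_pair_append (List.range (notes.length - n))
        (fun k => (PySem.List.slice notes (some (k : Int)) (some ((k : Int) + (n : Int)))).map (fun c => m.getD c 0))
        (fun k => m.getD (PySem.List.pyGetD notes ((k : Int) + (n : Int)) "") 0) acc.1 acc.2) ?_
    have hml : (notes.map (fun c => m.getD c 0)).length = notes.length := by simp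
    refine congrArg₂ Prod.mk (congrArg _ ?_) (congrArg _ ?_)
    · rw [hml]
      apply List.map_congr_left
      intro k hk
      rw [PySem.List.slice_natCast_add, List.map_take, List.map_drop]
    · rw [← pv_drop_eq_range_map (notes.map (fun c => m.getD c 0)) n (by rw [hml]; omega), hml]
      apply List.map_congr_left
      intro k hk
      rw [List.mem_range] at hk
      have hcast : ((k : Int) + (n : Int)) = ((k + n : Nat) : Int) := by push_cast; ring
      rw [hcast, PySem.List.pyGetD_natCast]
      have hkn : k + n < notes.length := by omega
      rw [List.getD_eq_getElem _ _ hkn, List.getD_eq_getElem _ _ (by rw [hml]; omega)]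
      simp [Nat.add_comm n k]
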